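-- pv_equiv track=rewrite | github.com/coding-samu/Algo2 | dynamicProgrammingMethods.py | sequence_without_3_consecutive_zeros
-- ===== SOURCE A (Python) =====
-- def sequence_without_3_consecutive_zeros(n):
--     T = [0]*(n+1)
--     if n <= 1:
--         return n+1
--     T[0] = 1
--     T[1] = 2
--     T[2] = 4
--     for i in range (3,n+1):
--         T[i] = T[i-1] + T[i-2] + T[i-3]
--     return T[n]
-- ===== SOURCE B (Python) =====
-- def sequence_without_3_consecutive_zeros(n):
--     # Matrix exponentiation of the tribonacci recurrence: O(log n) multiplications.
--     if n <= 1: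
--         return n + 1
--
--     def mul(A, B):
--         return tuple(
--             tuple(sum(A[i][k] * B[k][j] for k in range(3)) for j in range(3))
--             for i in range(3)
--         )
--
--     def mat_pow(M, e):
--         if e == 0:
--             return ((1, 0, 0), (0, 1, 0), (0, 0, 1))
--         H = mat_pow(M, e // 2)
--         H2 = mul(H, H)
--         return mul(H2, M) if e % 2 == 1 else H2
--
--     M = ((1, 1, 1), (1, 0, 0), (0, 1, 0))
--     a, b, c = mat_pow(M, n - 2)[0]
--     return a * 4 + b * 2 + c
-- ===== Notes on version B (the rewrite author's own statement) =====
-- stated objective: faster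
-- what changed: replaces the O(n) table-filling loop over the tribonacci-style recurrence by binary matrix exponentiation of its 3x3 companion matrix
import Mathlib
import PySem

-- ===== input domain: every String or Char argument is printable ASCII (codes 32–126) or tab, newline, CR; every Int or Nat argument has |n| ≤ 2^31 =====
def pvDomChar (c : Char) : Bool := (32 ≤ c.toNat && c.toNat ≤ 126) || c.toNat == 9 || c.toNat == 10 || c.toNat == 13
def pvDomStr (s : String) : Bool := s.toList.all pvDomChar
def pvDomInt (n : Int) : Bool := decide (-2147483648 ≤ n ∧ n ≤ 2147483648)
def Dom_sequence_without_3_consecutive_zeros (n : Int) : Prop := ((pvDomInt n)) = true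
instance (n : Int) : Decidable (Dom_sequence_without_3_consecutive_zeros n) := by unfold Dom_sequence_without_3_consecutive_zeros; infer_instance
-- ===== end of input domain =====

-- B replaces A's O(n) table-filling loop by binary exponentiation of the 3x3 companion
-- matrix of the same recurrence (objective: faster, O(log n) multiplications).

-- ===== PORT A =====
-- Python's list is a mutable array: the table T is an Array Int (O(1) get/set, as in Python).
-- loop body: T[i] = T[i-1] + T[i-2] + T[i-3]  (indices always in range, so getD/setIfInBounds are exact)
def pvStep (T : Array Int) (i : Int) : Array Int :=
  T.setIfInBounds i.toNat (T.getD (i - 1).toNat 0 + T.getD (i - 2).toNat 0 + T.getD (i - 3).toNat 0)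

def sequence_without_3_consecutive_zeros (n : Int) : Int :=
  -- T = [0]*(n+1)   (a negative n+1 gives the empty list, as in Python)
  let T : Array Int := Array.replicate (n + 1).toNat 0
  if n ≤ 1 then n + 1
  else
    -- T[0] = 1; T[1] = 2; T[2] = 4
    let T := ((T.setIfInBounds 0 1).setIfInBounds 1 2).setIfInBounds 2 4
    -- for i in range(3, n+1): T[i] = T[i-1] + T[i-2] + T[i-3]
    let T := (PySem.List.pyRange 3 (n + 1)).foldl pvStep T
    -- return T[n]  (in range here since n ≥ 2)
    T.getD n.toNat 0

-- ===== PORT B =====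
-- 3x3 integer matrices as nested triples, as in Source B
def pvMul (A B : (Int × Int × Int) × (Int × Int × Int) × (Int × Int × Int)) :
    (Int × Int × Int) × (Int × Int × Int) × (Int × Int × Int) :=
  let ((a11, a12, a13), (a21, a22, a23), (a31, a32, a33)) := A
  let ((b11, b12, b13), (b21, b22, b23), (b31, b32, b33)) := B
  ((a11*b11 + a12*b21 + a13*b31, a11*b12 + a12*b22 + a13*b32, a11*b13 + a12*b23 + a13*b33),
   (a21*b11 + a22*b21 + a23*b31, a21*b12 + a22*b22 + a23*b32, a21*b13 + a22*b23 + a23*b33),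
   (a31*b11 + a32*b21 + a33*b31, a31*b12 + a32*b22 + a33*b32, a31*b13 + a32*b23 + a33*b33))

def pvIdMat : (Int × Int × Int) × (Int × Int × Int) × (Int × Int × Int) :=
  ((1, 0, 0), (0, 1, 0), (0, 0, 1))

-- mat_pow(M, e) of Source B; e is a nonnegative int there, so Nat recursion is exact
def pvMatPow (M : (Int × Int × Int) × (Int × Int × Int) × (Int × Int × Int)) (e : Nat) :
    (Int × Int × Int) × (Int × Int × Int) × (Int × Int × Int) :=
  if h : e = 0 then pvIdMat
  else
    let H := pvMatPow M (e / 2)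
    let H2 := pvMul H H
    if e % 2 = 1 then pvMul H2 M else H2
decreasing_by omega

def pvCompanion : (Int × Int × Int) × (Int × Int × Int) × (Int × Int × Int) :=
  ((1, 1, 1), (1, 0, 0), (0, 1, 0))

def sequence_without_3_consecutive_zeros_alt (n : Int) : Int :=
  if n ≤ 1 then n + 1
  else
    -- a, b, c = mat_pow(M, n-2)[0]; return a*4 + b*2 + c
    let r := (pvMatPow pvCompanion (n - 2).toNat).1
    r.1 * 4 + r.2.1 * 2 + r.2.2

-- ===== PRECONDITION & SPEC =====
def Spec_sequence_without_3_consecutive_zeros (n : Int) (out : Int) : Prop := out = sequence_without_3_consecutive_zeros_alt n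
instance (n : Int) (out : Int) : Decidable (Spec_sequence_without_3_consecutive_zeros n out) := by unfold Spec_sequence_without_3_consecutive_zeros; infer_instance

-- ===== CLAIM (what is proved, stated in full; the proofs are below) =====
def Claim_equal_sequence_without_3_consecutive_zeros : Prop := ∀ (n : Int), Dom_sequence_without_3_consecutive_zeros n → Spec_sequence_without_3_consecutive_zeros n (sequence_without_3_consecutive_zeros n)

-- ===== LEMMAS AND PROOFS =====

-- the common mathematical object: the recurrence both programs compute
def trib : Nat → Int
  | 0 => 1
  | 1 => 2
  | 2 => 4
  | k + 3 => trib (k + 2) + trib (k + 1) + trib k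

lemma trib_add_three (k : Nat) : trib (k + 3) = trib (k + 2) + trib (k + 1) + trib k := by
  simp [trib]

-- linear matrix power, the reference semantics for pvMatPow
def pvNPow (M : (Int × Int × Int) × (Int × Int × Int) × (Int × Int × Int)) :
    Nat → (Int × Int × Int) × (Int × Int × Int) × (Int × Int × Int)
  | 0 => pvIdMat
  | k + 1 => pvMul (pvNPow M k) M

lemma pvMul_id (A : (Int × Int × Int) × (Int × Int × Int) × (Int × Int × Int)) :
    pvMul A pvIdMat = A := by
  obtain ⟨⟨a, b, c⟩, ⟨d, e, f⟩, ⟨g, h, i⟩⟩ := A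
  simp [pvMul, pvIdMat]

lemma pvId_mul (A : (Int × Int × Int) × (Int × Int × Int) × (Int × Int × Int)) :
    pvMul pvIdMat A = A := by
  obtain ⟨⟨a, b, c⟩, ⟨d, e, f⟩, ⟨g, h, i⟩⟩ := A
  simp [pvMul, pvIdMat]

lemma pvMul_assoc (A B C : (Int × Int × Int) × (Int × Int × Int) × (Int × Int × Int)) :
    pvMul (pvMul A B) C = pvMul A (pvMul B C) := by
  obtain ⟨⟨a11, a12, a13⟩, ⟨a21, a22, a23⟩, ⟨a31, a32, a33⟩⟩ := A
  obtain ⟨⟨b11, b12, b13⟩, ⟨b21, b22, b23⟩, ⟨b31, b32, b33⟩⟩ := B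
  obtain ⟨⟨c11, c12, c13⟩, ⟨c21, c22, c23⟩, ⟨c31, c32, c33⟩⟩ := C
  simp only [pvMul, Prod.mk.injEq]
  and_intros <;> ring

lemma pvNPow_add (M : (Int × Int × Int) × (Int × Int × Int) × (Int × Int × Int)) (a b : Nat) :
    pvNPow M (a + b) = pvMul (pvNPow M a) (pvNPow M b) := by
  induction b with
  | zero => simp [pvNPow, pvMul_id]
  | succ b ih =>
      show pvNPow M (a + b + 1) = _
      simp only [pvNPow, ih, pvMul_assoc]

lemma pvNPow_succ_comm (M : (Int × Int × Int) × (Int × Int × Int) × (Int × Int × Int)) (k : Nat) :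
    pvNPow M (k + 1) = pvMul M (pvNPow M k) := by
  induction k with
  | zero => simp [pvNPow, pvMul_id, pvId_mul]
  | succ k ih =>
      calc pvNPow M (k + 1 + 1) = pvMul (pvNPow M (k + 1)) M := rfl
        _ = pvMul (pvMul M (pvNPow M k)) M := by rw [ih]
        _ = pvMul M (pvMul (pvNPow M k) M) := pvMul_assoc ..
        _ = pvMul M (pvNPow M (k + 1)) := rfl

lemma pvMatPow_eq (M : (Int × Int × Int) × (Int × Int × Int) × (Int × Int × Int)) (e : Nat) :
    pvMatPow M e = pvNPow M e := by
  induction e using Nat.strong_induction_on with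
  | _ e ih =>
    rw [pvMatPow]
    by_cases h : e = 0
    · simp [h, pvNPow]
    · rw [dif_neg h]
      simp only [ih (e / 2) (by omega)]
      by_cases hodd : e % 2 = 1
      · rw [if_pos hodd]
        calc pvMul (pvMul (pvNPow M (e / 2)) (pvNPow M (e / 2))) M
            = pvMul (pvNPow M (e / 2 + e / 2)) M := by rw [pvNPow_add]
          _ = pvNPow M (e / 2 + e / 2 + 1) := rfl
          _ = pvNPow M e := by congr 1; omega
      · rw [if_neg hodd, ← pvNPow_add]
        congr 1
        omega

-- matrix applied to a column vector
def pvApp (P : (Int × Int × Int) × (Int × Int × Int) × (Int × Int × Int)) (v : Int × Int × Int) :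
    Int × Int × Int :=
  let ((a11, a12, a13), (a21, a22, a23), (a31, a32, a33)) := P
  let (x, y, z) := v
  (a11*x + a12*y + a13*z, a21*x + a22*y + a23*z, a31*x + a32*y + a33*z)

lemma pvApp_mul (A B : (Int × Int × Int) × (Int × Int × Int) × (Int × Int × Int)) (v : Int × Int × Int) :
    pvApp (pvMul A B) v = pvApp A (pvApp B v) := by
  obtain ⟨⟨a11, a12, a13⟩, ⟨a21, a22, a23⟩, ⟨a31, a32, a33⟩⟩ := A
  obtain ⟨⟨b11, b12, b13⟩, ⟨b21, b22, b23⟩, ⟨b31, b32, b33⟩⟩ := B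
  obtain ⟨x, y, z⟩ := v
  simp only [pvMul, pvApp, Prod.mk.injEq]
  and_intros <;> ring

lemma pvKey (e : Nat) :
    pvApp (pvNPow pvCompanion e) (4, 2, 1) = (trib (e + 2), trib (e + 1), trib e) := by
  induction e with
  | zero => decide
  | succ e ih =>
      rw [pvNPow_succ_comm, pvApp_mul, ih]
      simp only [pvApp, pvCompanion, Prod.mk.injEq]
      refine ⟨?_, by ring, by ring⟩
      rw [show e + 1 + 2 = e + 3 from rfl, trib_add_three]
      ring

-- B's value on n ≥ 2
lemma alt_eq_trib (n : Int) (h : 2 ≤ n) :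
    sequence_without_3_consecutive_zeros_alt n = trib n.toNat := by
  have h2 : (n - 2).toNat + 2 = n.toNat := by omega
  have hkey := pvKey (n - 2).toNat
  show (if n ≤ 1 then n + 1 else
      (pvMatPow pvCompanion (n - 2).toNat).1.1 * 4 +
      (pvMatPow pvCompanion (n - 2).toNat).1.2.1 * 2 +
      (pvMatPow pvCompanion (n - 2).toNat).1.2.2) = trib n.toNat
  rw [if_neg (by omega), pvMatPow_eq]
  rcases hP : pvNPow pvCompanion (n - 2).toNat with ⟨⟨a, b, c⟩, ⟨d, e, f⟩, ⟨g, hh, i⟩⟩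
  rw [hP] at hkey
  simp only [pvApp, Prod.mk.injEq] at hkey
  obtain ⟨h1, -, -⟩ := hkey
  rw [h2] at h1
  simp only
  linarith [h1]

-- A-side, proof view: the same loop on the list underlying the array
def pvStepL (T : List Int) (i : Int) : List Int :=
  T.set i.toNat (T.getD (i - 1).toNat 0 + T.getD (i - 2).toNat 0 + T.getD (i - 3).toNat 0)

lemma pvArr_getD (a : Array Int) (i : Nat) : a.getD i 0 = a.toList.getD i 0 := by
  by_cases h : i < a.size <;> simp [Array.getD, List.getD, h]

lemma pvStep_toList (T : Array Int) (i : Int) : (pvStep T i).toList = pvStepL T.toList i := by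
  simp [pvStep, pvStepL, Array.toList_setIfInBounds]

lemma pvFold_toList (l : List Int) (T : Array Int) :
    (l.foldl pvStep T).toList = l.foldl pvStepL T.toList := by
  induction l generalizing T with
  | nil => rfl
  | cons x xs ih => simp [List.foldl_cons, ih, pvStep_toList]

-- the initialised table, list view
def pvT0 (N : Nat) : List Int := (((List.replicate N (0 : Int)).set 0 1).set 1 2).set 2 4

lemma getD_set_self (xs : List Int) (i : Nat) (v : Int) (h : i < xs.length) :
    (xs.set i v).getD i 0 = v := by
  simp [List.getD, h]

lemma getD_set_ne (xs : List Int) (i j : Nat) (v : Int) (h : i ≠ j) :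
    (xs.set i v).getD j 0 = xs.getD j 0 := by
  simp [List.getD, h]

lemma pvT0_length (N : Nat) : (pvT0 N).length = N := by
  simp [pvT0]

lemma pvT0_getD (N : Nat) (hN : 3 ≤ N) (j : Nat) (hj : j < 3) :
    (pvT0 N).getD j 0 = trib j := by
  interval_cases j
  · unfold pvT0
    rw [getD_set_ne _ _ _ _ (by omega), getD_set_ne _ _ _ _ (by omega),
        getD_set_self _ _ _ (by simp; omega)]
    rfl
  · unfold pvT0
    rw [getD_set_ne _ _ _ _ (by omega), getD_set_self _ _ _ (by simp; omega)]
    rfl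
  · unfold pvT0
    rw [getD_set_self _ _ _ (by simp; omega)]
    rfl

-- the loop invariant of A's for-loop
lemma pvLoop_inv (N : Nat) (hN : 3 ≤ N) (k : Nat) (hk : 3 + k ≤ N) :
    (((PySem.List.pyRange 3 (3 + (k : Int))).foldl pvStepL (pvT0 N)).length = N) ∧
    (∀ j : Nat, j < 3 + k →
      ((PySem.List.pyRange 3 (3 + (k : Int))).foldl pvStepL (pvT0 N)).getD j 0 = trib j) := by
  induction k with
  | zero =>
      have hr : PySem.List.pyRange 3 (3 + ((0 : Nat) : Int)) = [] := by decide
      rw [hr]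
      simp only [List.foldl_nil]
      exact ⟨pvT0_length N, fun j hj => pvT0_getD N hN j hj⟩
  | succ k ih =>
      obtain ⟨hL, hV⟩ := ih (by omega)
      have hr : PySem.List.pyRange 3 (3 + ((k + 1 : Nat) : Int)) =
          PySem.List.pyRange 3 (3 + (k : Int)) ++ [3 + (k : Int)] := by
        rw [show (3 : Int) + ((k + 1 : Nat) : Int) = (3 + (k : Int)) + 1 by push_cast; ring]
        exact PySem.List.pyRange_one_succ_right (by omega)
      rw [hr, List.foldl_append]
      simp only [List.foldl_cons, List.foldl_nil]
      set L := (PySem.List.pyRange 3 (3 + (k : Int))).foldl pvStepL (pvT0 N) with hLdef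
      have ht0 : ((3 : Int) + (k : Int)).toNat = 3 + k := by omega
      have ht1 : ((3 : Int) + (k : Int) - 1).toNat = 2 + k := by omega
      have ht2 : ((3 : Int) + (k : Int) - 2).toNat = 1 + k := by omega
      have ht3 : ((3 : Int) + (k : Int) - 3).toNat = k := by omega
      constructor
      · simp [pvStepL, hL]
      · intro j hj
        unfold pvStepL
        rw [ht0, ht1, ht2, ht3]
        by_cases hjk : j = 3 + k
        · subst hjk
          rw [getD_set_self _ _ _ (by rw [hL]; omega)]
          rw [hV (2 + k) (by omega), hV (1 + k) (by omega), hV k (by omega)]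
          rw [show 3 + k = k + 3 by omega, trib_add_three]
          rw [show k + 2 = 2 + k by omega, show k + 1 = 1 + k by omega]
        · rw [getD_set_ne _ _ _ _ (by omega)]
          exact hV j (by omega)

-- A's value on n ≥ 2
lemma a_eq_trib (n : Int) (h : 2 ≤ n) :
    sequence_without_3_consecutive_zeros n = trib n.toNat := by
  show (if n ≤ 1 then n + 1 else
      ((PySem.List.pyRange 3 (n + 1)).foldl pvStep
        ((((Array.replicate (n + 1).toNat 0).setIfInBounds 0 1).setIfInBounds 1 2).setIfInBounds
          2 4)).getD n.toNat 0)
      = trib n.toNat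
  rw [if_neg (by omega)]
  rw [pvArr_getD, pvFold_toList]
  have hT0 : ((((Array.replicate (n + 1).toNat (0 : Int)).setIfInBounds 0 1).setIfInBounds
      1 2).setIfInBounds 2 4).toList = pvT0 (n + 1).toNat := by
    simp [pvT0, Array.toList_setIfInBounds, Array.toList_replicate]
  rw [hT0]
  set N := (n + 1).toNat with hNdef
  have hb : n + 1 = 3 + ((N - 3 : Nat) : Int) := by omega
  obtain ⟨hL, hV⟩ := pvLoop_inv N (by omega) (N - 3) (by omega)
  rw [hb]
  exact hV n.toNat (by omega)

-- ===== VERDICT (by name: the statement is the Claim_ definition above) =====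
theorem sequence_without_3_consecutive_zeros_spec : Claim_equal_sequence_without_3_consecutive_zeros := by
  intro n _
  unfold Spec_sequence_without_3_consecutive_zeros
  by_cases h : n ≤ 1
  · simp [sequence_without_3_consecutive_zeros, sequence_without_3_consecutive_zeros_alt, h]
  · rw [a_eq_trib n (by omega), alt_eq_trib n (by omega)]
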